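-- pv_equiv track=rewrite | github.com/Blossomyyh/leetcode | Robinhood.py | maxRibbon
-- ===== SOURCE A (Python) =====
-- def maxRibbon(array, k):
--     result = 0
--     size = k
--     while size >0:
--         res = 0
--         for i in array:
--             res += i // size
--         if res >= k:
--             result = max(result, size)
--         size -= 1
--     return result
-- ===== SOURCE B (Python) =====
-- def maxRibbon(array, k):
--     # Transposed strategy: build the per-size piece-count table in one pass
--     # per element, then scan sizes descending and return the first hit.
--     acc = [0] * k
--     for a in array:
--         acc = [c + a // s for c, s in zip(acc, range(1, k + 1))]
--     for s, c in reversed(list(zip(range(1, k + 1), acc))):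
--         if c >= k:
--             return s
--     return 0
-- ===== Notes on version B (the rewrite author's own statement) =====
-- stated objective: alternative
-- what changed: Instead of re-summing the whole array once per candidate size with a running max, B builds the per-size piece-count table by zipping it with each element once, then does a single descending scan that early-returns at the first size whose count reaches k (binary search would be wrong here: counts are not monotone when the array has negative entries).
import Mathlib
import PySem

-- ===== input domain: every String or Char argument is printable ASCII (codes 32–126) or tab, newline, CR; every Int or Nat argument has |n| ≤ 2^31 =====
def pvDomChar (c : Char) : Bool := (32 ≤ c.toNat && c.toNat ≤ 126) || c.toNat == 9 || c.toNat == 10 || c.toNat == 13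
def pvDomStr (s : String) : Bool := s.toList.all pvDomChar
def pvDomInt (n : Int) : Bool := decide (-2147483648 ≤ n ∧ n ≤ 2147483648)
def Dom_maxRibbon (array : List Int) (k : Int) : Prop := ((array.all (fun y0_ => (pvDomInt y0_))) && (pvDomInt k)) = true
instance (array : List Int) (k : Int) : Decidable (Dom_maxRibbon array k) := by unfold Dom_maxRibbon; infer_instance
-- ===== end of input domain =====

-- B replaces A's per-size re-summation with a per-size count table built once and a
-- descending early-return scan; same O(n*k) cost, different structure (alternative).


-- ===== PORT A =====
-- res = 0; for i in array: res += i // size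
def pvResSum (array : List Int) (size : Int) : Int :=
  array.foldl (fun res i => res + PySem.Int.floordiv i size) 0

-- while size > 0: … ; size -= 1   (fuel n = current size, as a Nat; size = (n : Int))
def pvALoop (array : List Int) (k : Int) : Nat → Int → Int
  | 0, result => result
  | n + 1, result =>
      let size : Int := ((n + 1 : Nat) : Int)
      let res := pvResSum array size
      pvALoop array k n (if res ≥ k then max result size else result)

def maxRibbon (array : List Int) (k : Int) : Int :=
  pvALoop array k k.toNat 0

-- ===== PORT B =====
-- for s, c in reversed(list(zip(range(1,k+1), acc))): if c >= k: return s  / return 0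
def pvScan (k : Int) : List (Int × Int) → Int
  | [] => 0
  | (s, c) :: rest => if c ≥ k then s else pvScan k rest

def maxRibbon_alt (array : List Int) (k : Int) : Int :=
  let sizes := PySem.List.pyRange 1 (k + 1) 1
  let acc := array.foldl
    (fun acc a => List.zipWith (fun c s => c + PySem.Int.floordiv a s) acc sizes)
    (List.replicate k.toNat 0)
  pvScan k ((sizes.zip acc).reverse)

-- ===== PRECONDITION & SPEC =====
def Spec_maxRibbon (array : List Int) (k : Int) (out : Int) : Prop := out = maxRibbon_alt array k
instance (array : List Int) (k : Int) (out : Int) : Decidable (Spec_maxRibbon array k out) := by unfold Spec_maxRibbon; infer_instance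

-- ===== CLAIM (what is proved, stated in full; the proofs are below) =====
def Claim_equal_maxRibbon : Prop := ∀ (array : List Int) (k : Int), Dom_maxRibbon array k → Spec_maxRibbon array k (maxRibbon array k)

-- ===== LEMMAS AND PROOFS =====

-- zipWith over the same right list composes pointwise
theorem pv_zipWith_zipWith {α β γ δ : Type} (f : γ → β → δ) (g : α → β → γ) :
    ∀ (l1 : List α) (l2 : List β),
      List.zipWith f (List.zipWith g l1 l2) l2 = List.zipWith (fun a b => f (g a b) b) l1 l2 := by
  intro l1
  induction l1 with
  | nil => intro l2; simp
  | cons a t ih => intro l2; cases l2 with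
    | nil => simp
    | cons b t2 => simp [List.zipWith, ih]

theorem pv_zipWith_fst (l : List Int) :
    ∀ (init : List Int), init.length = l.length →
      List.zipWith (fun c (_ : Int) => c) init l = init := by
  induction l with
  | nil => intro init h; simp_all
  | cons _ t ih =>
    intro init h
    cases init with
    | nil => simp at h
    | cons c ct =>
      simp only [List.zipWith]
      rw [ih ct (by simpa using h)]

theorem pvResSum_nil (s : Int) : pvResSum [] s = 0 := rfl

theorem pvResSum_shift (array : List Int) (s : Int) :
    ∀ (x : Int), array.foldl (fun res i => res + PySem.Int.floordiv i s) x
      = x + pvResSum array s := by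
  induction array with
  | nil => intro x; simp [pvResSum]
  | cons a t ih =>
    intro x
    simp only [pvResSum, List.foldl_cons] at *
    rw [ih, ih (0 + PySem.Int.floordiv a s)]
    ring

theorem pvResSum_cons (a : Int) (t : List Int) (s : Int) :
    pvResSum (a :: t) s = PySem.Int.floordiv a s + pvResSum t s := by
  show List.foldl _ 0 (a :: t) = _
  rw [List.foldl_cons, pvResSum_shift t s]
  ring

-- the fold of B builds the table of piece-counts
theorem pv_acc_eq (sizes : List Int) :
    ∀ (array : List Int) (init : List Int), init.length = sizes.length →
      array.foldl (fun acc a => List.zipWith (fun c s => c + PySem.Int.floordiv a s) acc sizes) init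
        = List.zipWith (fun c s => c + pvResSum array s) init sizes := by
  intro array
  induction array with
  | nil =>
    intro init h
    simp only [List.foldl_nil, pvResSum_nil, add_zero]
    exact (pv_zipWith_fst sizes init h).symm
  | cons a t ih =>
    intro init h
    simp only [List.foldl_cons]
    rw [ih _ (by simp [h])]
    rw [pv_zipWith_zipWith]
    have : (fun (c s : Int) => c + PySem.Int.floordiv a s + pvResSum t s)
        = (fun (c s : Int) => c + pvResSum (a :: t) s) := by
      funext c s
      rw [pvResSum_cons]
      ring
    rw [this]

theorem pv_zipWith_replicate {f : Int → Int → Int} (x : Int) :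
    ∀ (l : List Int), List.zipWith f (List.replicate l.length x) l = l.map (fun s => f x s) := by
  intro l
  induction l with
  | nil => simp
  | cons a t ih => simp [List.replicate, ih]

theorem pv_zip_map_self {g : Int → Int} :
    ∀ (l : List Int), l.zip (l.map g) = l.map (fun s => (s, g s)) := by
  intro l
  induction l with
  | nil => simp
  | cons a t ih => simp [ih]

-- descending scan as a function of the fuel
def pvS (array : List Int) (k : Int) (n : Nat) : Int :=
  pvScan k ((PySem.List.pyRange (n : Int) 0 (-1)).map (fun s => (s, pvResSum array s)))

theorem pvS_zero (array : List Int) (k : Int) : pvS array k 0 = 0 := by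
  simp [pvS, PySem.List.pyRange_neg_one_eq_nil (by omega : (0:Int) ≤ 0), pvScan]

theorem pvS_succ (array : List Int) (k : Int) (n : Nat) :
    pvS array k (n + 1) = if pvResSum array ((n+1 : Nat) : Int) ≥ k
      then ((n+1 : Nat) : Int) else pvS array k n := by
  unfold pvS
  rw [PySem.List.pyRange_neg_one_cons (by push_cast; omega : (0:Int) < ((n+1 : Nat) : Int))]
  have : ((n+1 : Nat) : Int) - 1 = (n : Int) := by push_cast; omega
  rw [this]
  simp [pvScan]

theorem pvS_bounds (array : List Int) (k : Int) :
    ∀ (n : Nat), 0 ≤ pvS array k n ∧ pvS array k n ≤ (n : Int) := by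
  intro n
  induction n with
  | zero => simp [pvS_zero]
  | succ m ih =>
    rw [pvS_succ]
    split
    · push_cast; omega
    · push_cast; omega

theorem pvALoop_eq (array : List Int) (k : Int) :
    ∀ (n : Nat) (r : Int), 0 ≤ r → pvALoop array k n r = max r (pvS array k n) := by
  intro n
  induction n with
  | zero => intro r hr; simp [pvALoop, pvS_zero]; omega
  | succ m ih =>
    intro r hr
    simp only [pvALoop]
    rw [pvS_succ]
    have hb := pvS_bounds array k m
    split
    · rw [ih _ (by positivity)]
      have : (0:Int) ≤ ((m+1 : Nat) : Int) := by positivity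
      omega
    · rw [ih _ hr]

-- ===== VERDICT (by name: the statement is the Claim_ definition above) =====
theorem maxRibbon_spec : Claim_equal_maxRibbon := by
  intro array k _
  unfold Spec_maxRibbon maxRibbon
  have halt : maxRibbon_alt array k
      = pvScan k (((PySem.List.pyRange 1 (k+1) 1)).zip
          (array.foldl (fun acc a => List.zipWith (fun c s => c + PySem.Int.floordiv a s) acc (PySem.List.pyRange 1 (k+1) 1))
            (List.replicate k.toNat 0))).reverse := rfl
  rw [halt]
  have hlen : (List.replicate k.toNat (0:Int)).length = (PySem.List.pyRange 1 (k+1) 1).length := by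
    simp [PySem.List.length_pyRange_one]
  rw [pv_acc_eq _ _ _ hlen]
  have hrep : (List.replicate k.toNat (0:Int))
      = List.replicate (PySem.List.pyRange 1 (k+1) 1).length 0 := by
    rw [PySem.List.length_pyRange_one]; simp
  rw [hrep, pv_zipWith_replicate, pv_zip_map_self, ← List.map_reverse]
  have hrev : (PySem.List.pyRange 1 (k+1) 1).reverse = PySem.List.pyRange (k.toNat : Int) 0 (-1) := by
    by_cases hk : 0 ≤ k
    · rw [PySem.List.pyRange_neg_one_eq_reverse]
      have : k.toNat = (k : Int) := by omega
      rw [this]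
      norm_num
    · rw [PySem.List.pyRange_one_eq_nil (by omega), PySem.List.pyRange_neg_one_eq_nil (by omega)]
      simp
  rw [hrev]
  simp only [zero_add]
  rw [pvALoop_eq array k k.toNat 0 le_rfl]
  have := pvS_bounds array k k.toNat
  show max 0 (pvS array k k.toNat) = pvS array k k.toNat
  omega
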